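-- pv_equiv track=rewrite | github.com/sidatasciencelab/dna-spacy | scripts/build_corpus.py | kmer2window
-- ===== SOURCE A (Python) =====
-- def kmer2window(kmers, window_size):
--     windows = []
--     for i in range(0, len(kmers), window_size):
--         window = kmers[i:i + window_size]
--         if len(window) < window_size and len(windows) > 0:
--             # If the window size is less than the required size and there are previous windows
--             missing_count = window_size - len(window)
--             previous_window_kmers = windows[-1][-missing_count:]
--             window.extend(previous_window_kmers[:missing_count])
--         windows.append(window)
--     return windows
-- ===== SOURCE B (Python) =====
-- def kmer2window(kmers, window_size):
--     # Single element-wise pass with an accumulator: fill the current window one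
--     # kmer at a time, flushing it when full; a trailing partial window borrows
--     # the tail of the last full window.
--     if window_size < 0:
--         return []
--     windows = []
--     current = []
--     for kmer in kmers:
--         current.append(kmer)
--         if len(current) == window_size:
--             windows.append(current)
--             current = []
--     if current:
--         if windows:
--             current += windows[-1][len(current) - window_size:]
--         windows.append(current)
--     return windows
-- ===== Notes on version B (the rewrite author's own statement) =====
-- stated objective: alternative
-- what changed: B replaces A's index-stride loop with repeated slicing by a single element-wise pass that fills a current-window accumulator and flushes it when full, handling the trailing partial window (and its borrow from the last full window) once after the loop.
import Mathlib
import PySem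

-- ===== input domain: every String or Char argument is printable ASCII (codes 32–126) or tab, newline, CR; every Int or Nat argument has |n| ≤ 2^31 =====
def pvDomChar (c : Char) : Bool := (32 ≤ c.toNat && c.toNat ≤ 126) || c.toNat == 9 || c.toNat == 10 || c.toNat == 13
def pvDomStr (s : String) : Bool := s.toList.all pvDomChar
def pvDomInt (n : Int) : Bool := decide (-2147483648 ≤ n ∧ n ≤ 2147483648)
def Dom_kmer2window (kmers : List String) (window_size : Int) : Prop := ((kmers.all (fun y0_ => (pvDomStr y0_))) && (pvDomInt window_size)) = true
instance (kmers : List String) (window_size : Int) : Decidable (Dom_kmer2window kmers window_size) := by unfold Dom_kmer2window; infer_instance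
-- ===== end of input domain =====

-- B replaces the index-stride/slicing loop by a single element-wise pass with a
-- current-window accumulator, doing the borrow for a trailing short window once
-- after the loop (objective: alternative decomposition, same cost).

-- ===== PORT A =====
-- loop body of A's for-loop (helper; the per-iteration conditional borrow)
def kwStep (kmers : List String) (window_size : Int) (windows : List (List String)) (i : Int) : List (List String) :=
  let window := PySem.List.slice kmers (some i) (some (i + window_size))
  windows ++
    [if ((window.length : Int) < window_size ∧ 0 < windows.length) then
        -- missing_count = window_size - len(window); windows[-1]: guard ensures nonempty, so pyGetD with dummy default is exact
        window ++ PySem.List.slice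
          (PySem.List.slice (PySem.List.pyGetD windows (-1) ([] : List String))
            (some (-(window_size - (window.length : Int)))) none)
          none (some (window_size - (window.length : Int)))
      else window]

def kmer2window (kmers : List String) (window_size : Int) : List (List String) :=
  (PySem.List.pyRange 0 (kmers.length : Int) window_size).foldl (kwStep kmers window_size) []

-- ===== PORT B =====
-- loop body of B's for-loop: append the kmer to the current window, flush when full
def altStep (window_size : Int) (st : List (List String) × List String) (kmer : String) : List (List String) × List String :=
  let current := st.2 ++ [kmer]
  if ((current.length : Int) = window_size) then (st.1 ++ [current], ([] : List String))
  else (st.1, current)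

def kmer2window_alt (kmers : List String) (window_size : Int) : List (List String) :=
  if window_size < 0 then []
  else
    let st := kmers.foldl (altStep window_size) ([], [])
    if st.2 ≠ [] then
      if st.1 ≠ [] then
        st.1 ++ [st.2 ++ PySem.List.slice (PySem.List.pyGetD st.1 (-1) ([] : List String)) (some ((st.2.length : Int) - window_size)) none]
      else st.1 ++ [st.2]
    else st.1

-- ===== PRECONDITION & SPEC =====
-- Pre_ excludes window_size = 0, on which Python's range raises ValueError in A.
def Pre_kmer2window (kmers : List String) (window_size : Int) : Prop := window_size ≠ 0
instance (kmers : List String) (window_size : Int) : Decidable (Pre_kmer2window kmers window_size) := by unfold Pre_kmer2window; infer_instance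
def pvWitness_kmer2window : List String × Int := (["AA", "AB", "BB"], 2)

def Spec_kmer2window (kmers : List String) (window_size : Int) (out : List (List String)) : Prop := out = kmer2window_alt kmers window_size
instance (kmers : List String) (window_size : Int) (out : List (List String)) : Decidable (Spec_kmer2window kmers window_size out) := by unfold Spec_kmer2window; infer_instance

-- ===== CLAIM (what is proved, stated in full; the proofs are below) =====
def Claim_equal_kmer2window : Prop := ∀ (kmers : List String) (window_size : Int), Dom_kmer2window kmers window_size → Pre_kmer2window kmers window_size → Spec_kmer2window kmers window_size (kmer2window kmers window_size)

-- ===== LEMMAS AND PROOFS =====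

-- B's fold, made explicit: pvCF k c xs = (full windows flushed, leftover current) starting from current = c
def pvCF (k : Nat) : List String → List String → List (List String) × List String
  | c, [] => ([], c)
  | c, x :: xs =>
    if c.length + 1 = k then
      ((c ++ [x]) :: (pvCF k [] xs).1, (pvCF k [] xs).2)
    else pvCF k (c ++ [x]) xs

-- canonical chunking: peel a full window of size m+1 while possible
def pvSpec (m : Nat) : List String → List (List String) × List String
  | [] => ([], [])
  | x :: xs =>
    if xs.length < m then ([], x :: xs)
    else ((x :: xs.take m) :: (pvSpec m (xs.drop m)).1, (pvSpec m (xs.drop m)).2)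
termination_by l => l.length
decreasing_by simp

theorem pvSpec_nil (m : Nat) : pvSpec m [] = ([], []) := by simp [pvSpec]

theorem pvSpec_cons (m : Nat) (x : String) (xs : List String) :
    pvSpec m (x :: xs) = if xs.length < m then ([], x :: xs)
      else ((x :: xs.take m) :: (pvSpec m (xs.drop m)).1, (pvSpec m (xs.drop m)).2) := by
  simp only [pvSpec]

-- A's post-pass view of the borrow (proof-side helper, as applied by kwStep_eq_patch)
def kwPatch (window_size : Int) (windows : List (List String)) : List (List String) :=
  if (1 < windows.length ∧ ((PySem.List.pyGetD windows (-1) ([] : List String)).length : Int) < window_size) then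
    windows.dropLast ++
      [PySem.List.pyGetD windows (-1) ([] : List String) ++
        PySem.List.slice (PySem.List.pyGetD windows (-2) ([] : List String))
          (some (-(window_size - ((PySem.List.pyGetD windows (-1) ([] : List String)).length : Int)))) none]
  else windows

-- windows[-2] of a list ending in a singleton is the old windows[-1]
theorem pyGetD_neg_two_append (F : List (List String)) (c : List String) (hF : F ≠ []) :
    PySem.List.pyGetD (F ++ [c]) (-2) ([] : List String) = PySem.List.pyGetD F (-1) ([] : List String) := by
  have h0 : 0 < F.length := List.length_pos_of_ne_nil hF
  rw [PySem.List.pyGetD_neg_ofNat (F ++ [c]) 2 ([] : List String) (by omega) (by simp; omega)]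
  rw [PySem.List.pyGetD_neg_one F ([] : List String) hF]
  rw [List.getLast_eq_getElem]
  rw [List.getElem_append_left (by simp; omega)]
  congr 1
  simp

-- ---------- A-side lemmas (loop = patch of the chunk list) ----------

theorem trim_eq (p : List String) (m : Int) (hm : 0 < m) :
    PySem.List.slice (PySem.List.slice p (some (-m)) none) none (some m)
      = PySem.List.slice p (some (-m)) none := by
  obtain ⟨k, rfl⟩ : ∃ k : Nat, (k : Int) = m := ⟨m.toNat, Int.toNat_of_nonneg hm.le⟩
  rw [PySem.List.slice_from_neg_natCast p k (by exact_mod_cast hm)]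
  rw [PySem.List.slice_to _ (by positivity)]
  rw [Int.toNat_natCast]
  apply List.take_of_length_le
  simp only [List.length_drop]
  omega

theorem kwStep_full (kmers : List String) (ws : Int) (acc : List (List String)) (i : Int)
    (h : ¬ (((PySem.List.slice kmers (some i) (some (i + ws))).length : Int) < ws)) :
    kwStep kmers ws acc i = acc ++ [PySem.List.slice kmers (some i) (some (i + ws))] := by
  simp only [kwStep]
  rw [if_neg (by tauto)]

theorem kwStep_eq_patch (kmers : List String) (ws : Int) (acc : List (List String)) (i : Int) :
    kwStep kmers ws acc i
      = kwPatch ws (acc ++ [PySem.List.slice kmers (some i) (some (i + ws))]) := by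
  set c := PySem.List.slice kmers (some i) (some (i + ws)) with hc
  have hlast : PySem.List.pyGetD (acc ++ [c]) (-1) ([] : List String) = c :=
    PySem.List.pyGetD_neg_one_append_singleton acc c ([] : List String)
  simp only [kwStep, kwPatch]
  rw [hlast]
  by_cases ha : 0 < acc.length
  · have hane : acc ≠ [] := by intro hnil; simp [hnil] at ha
    rw [pyGetD_neg_two_append acc c hane, List.dropLast_concat]
    by_cases hs : ((c.length : Int) < ws)
    · rw [if_pos ⟨hs, ha⟩, if_pos ⟨by simpa using ha, hs⟩, trim_eq _ _ (by simp only [← hc]; omega)]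
    · rw [if_neg (by tauto), if_neg (fun h => hs h.2)]
  · have hnil : acc = [] := by
      cases acc with
      | nil => rfl
      | cons x xs => simp at ha
    subst hnil
    rw [if_neg (by simp), if_neg (by simp)]

theorem loop_eq (kmers : List String) (ws : Int) (idxs : List Int) :
    ∀ (acc : List (List String)), idxs ≠ [] →
    (∀ i ∈ idxs.dropLast, ¬ (((PySem.List.slice kmers (some i) (some (i + ws))).length : Int) < ws)) →
    idxs.foldl (kwStep kmers ws) acc
      = kwPatch ws (acc ++ idxs.map (fun i => PySem.List.slice kmers (some i) (some (i + ws)))) := by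
  induction idxs with
  | nil => intro acc h _; exact absurd rfl h
  | cons i is ih =>
    intro acc _ hfull
    cases is with
    | nil => simpa using kwStep_eq_patch kmers ws acc i
    | cons j js =>
      have hifull := hfull i (by simp)
      rw [List.foldl_cons, kwStep_full kmers ws acc i hifull,
        ih (acc ++ [PySem.List.slice kmers (some i) (some (i + ws))]) (by simp)
          (fun i' hi' => hfull i' (by simp at hi' ⊢; tauto))]
      simp

theorem full_of_mem_dropLast (kmers : List String) (ws : Int) (hws : 0 < ws) (i : Int)
    (hi : i ∈ (PySem.List.pyRange 0 (kmers.length : Int) ws).dropLast) :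
    ¬ (((PySem.List.slice kmers (some i) (some (i + ws))).length : Int) < ws) := by
  rw [PySem.List.pyRange_of_pos 0 _ hws, ← List.map_dropLast] at hi
  obtain ⟨k, hk, rfl⟩ := List.mem_map.1 hi
  rw [List.dropLast_eq_take, List.length_range, List.take_range, List.mem_range] at hk
  have hmem : ((0 : Int) + ws * ((k + 1 : Nat) : Int)) ∈ PySem.List.pyRange 0 (kmers.length : Int) ws := by
    rw [PySem.List.pyRange_of_pos 0 _ hws]
    exact List.mem_map.2 ⟨k + 1, List.mem_range.2 (by omega), rfl⟩
  have hlt := ((PySem.List.mem_pyRange_iff_of_pos hws _).1 hmem).2.1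
  have hexp : (0 : Int) + ws * ((k + 1 : Nat) : Int) = 0 + ws * (k : Int) + ws := by push_cast; ring
  rw [hexp] at hlt
  have h0 : (0 : Int) ≤ 0 + ws * (k : Int) := by positivity
  rw [PySem.List.slice_toNat kmers h0 (by omega)]
  simp only [List.length_take, List.length_drop]
  omega

theorem pyRange_neg_empty (n ws : Int) (h : ws < 0) (hn : 0 ≤ n) :
    PySem.List.pyRange 0 n ws = [] := by
  simp only [PySem.List.pyRange]
  rw [if_neg (by omega : ¬ ws = 0)]
  rw [if_neg (by omega : ¬ (0 : Int) < ws), if_neg (by omega : ¬ n < 0)]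
  simp

-- positive-step range peels its first index
theorem pyRange_pos_cons (n k : Int) (hk : 0 < k) (hn : 0 < n) :
    PySem.List.pyRange 0 n k = 0 :: (PySem.List.pyRange 0 (n - k) k).map (fun i => k + i) := by
  rw [PySem.List.pyRange_of_pos 0 n hk, PySem.List.pyRange_of_pos 0 (n - k) hk, if_pos hn]
  have e1 : n - 0 + k - 1 = n - 1 + 1 * k := by ring
  rw [e1, Int.add_mul_ediv_right _ _ (by omega : k ≠ 0)]
  by_cases hbig : (0 : Int) < n - k
  · rw [if_pos hbig]
    have e2 : n - k - 0 + k - 1 = n - 1 := by ring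
    rw [e2]
    have hnn : 0 ≤ (n - 1) / k := Int.ediv_nonneg (by omega) (by omega)
    have hcnt : ((n - 1) / k + 1).toNat = ((n - 1) / k).toNat + 1 := by omega
    rw [hcnt, List.range_succ_eq_map]
    simp only [List.map_cons, List.map_map]
    congr 1
    · simp
    · apply List.map_congr_left
      intro j _
      simp only [Function.comp]
      push_cast
      ring
  · rw [if_neg hbig]
    have hz : (n - 1) / k = 0 := Int.ediv_eq_zero_of_lt (by omega) (by omega)
    rw [hz]
    simp [List.range_one]

-- ---------- B-side lemmas ----------

theorem foldl_altStep (m : Nat) (ws : Int) (hm : ws = (m : Int) + 1) :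
    ∀ (xs : List String) (W : List (List String)) (c : List String),
    xs.foldl (altStep ws) (W, c) = (W ++ (pvCF (m + 1) c xs).1, (pvCF (m + 1) c xs).2) := by
  intro xs
  induction xs with
  | nil => intro W c; simp [pvCF]
  | cons x xs ih =>
    intro W c
    rw [List.foldl_cons]
    by_cases h : c.length + 1 = m + 1
    · have hstep : altStep ws (W, c) x = (W ++ [c ++ [x]], []) := by
        simp only [altStep]
        rw [if_pos (by simp only [List.length_append, List.length_cons, List.length_nil, hm]; push_cast; omega)]
      rw [hstep, ih]
      simp only [pvCF]
      rw [if_pos h]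
      simp
    · have hstep : altStep ws (W, c) x = (W, c ++ [x]) := by
        simp only [altStep]
        rw [if_neg (by simp only [List.length_append, List.length_cons, List.length_nil, hm]; push_cast; omega)]
      rw [hstep, ih]
      simp only [pvCF]
      rw [if_neg h]

theorem pvCF_eq_pvSpec (m : Nat) :
    ∀ (xs c : List String), c.length < m + 1 →
    pvCF (m + 1) c xs = pvSpec m (c ++ xs) := by
  intro xs
  induction xs with
  | nil =>
    intro c hc
    cases c with
    | nil => simp [pvCF, pvSpec_nil]
    | cons y ys =>
      simp only [pvCF, List.append_nil, pvSpec_cons]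
      rw [if_pos (by simp at hc; omega)]
  | cons x xs ih =>
    intro c hc
    by_cases h : c.length + 1 = m + 1
    · simp only [pvCF]
      rw [if_pos h, ih [] (by simp)]
      cases c with
      | nil =>
        have hm0 : m = 0 := by simpa using h
        subst hm0
        simp only [List.nil_append, pvSpec_cons]
        rw [if_neg (by omega)]
        simp
      | cons y ys =>
        have hys : ys.length + 1 = m := by simpa using h
        simp only [List.cons_append, pvSpec_cons]
        rw [if_neg (by simp; omega)]
        rw [List.take_append, List.drop_append]
        have h1 : m - ys.length = 1 := by omega
        rw [List.take_of_length_le (by omega), List.drop_eq_nil_of_le (by omega), h1]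
        simp
    · simp only [pvCF]
      rw [if_neg h, ih (c ++ [x]) (by simp; omega)]
      simp

theorem chunks_eq_pvSpec (m : Nat) (l : List String) :
    (PySem.List.pyRange 0 (l.length : Int) ((m : Int) + 1)).map
        (fun i => PySem.List.slice l (some i) (some (i + ((m : Int) + 1))))
      = (pvSpec m l).1 ++ (if (pvSpec m l).2 = [] then [] else [(pvSpec m l).2]) := by
  induction l using pvSpec.induct m with
  | case1 =>
    rw [PySem.List.pyRange_of_pos _ _ (by positivity)]
    simp [pvSpec_nil]
  | case2 x xs h =>
    rw [pyRange_pos_cons _ _ (by positivity) (by simp)]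
    rw [PySem.List.pyRange_of_pos _ _ (by positivity : (0 : Int) < (m : Int) + 1)]
    rw [if_neg (by simp; omega)]
    simp only [List.map_cons]
    rw [PySem.List.slice_toNat _ le_rfl (by positivity)]
    rw [pvSpec_cons, if_pos h]
    have ht : List.take (((0 : Int) + ((m : Int) + 1)).toNat - (0 : Int).toNat) (List.drop (0 : Int).toNat (x :: xs)) = x :: xs := by
      apply List.take_of_length_le
      simp
      omega
    rw [ht]
    simp
  | case3 x xs h ih =>
    rw [pyRange_pos_cons _ _ (by positivity) (by simp)]
    simp only [List.map_cons, List.map_map]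
    rw [PySem.List.slice_toNat _ le_rfl (by positivity)]
    have hk : (((0 : Int) + ((m : Int) + 1)).toNat - (0 : Int).toNat) = m + 1 := by omega
    rw [hk]
    simp only [Int.toNat_zero, List.drop_zero, List.take_succ_cons]
    have hlen : ((x :: xs).length : Int) - ((m : Int) + 1) = ((xs.drop m).length : Int) := by
      simp
      omega
    have htail : ∀ i ∈ PySem.List.pyRange 0 (((x :: xs).length : Int) - ((m : Int) + 1)) ((m : Int) + 1),
        ((fun i => PySem.List.slice (x :: xs) (some i) (some (i + ((m : Int) + 1)))) ∘ (fun i => ((m : Int) + 1) + i)) i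
          = PySem.List.slice (xs.drop m) (some i) (some (i + ((m : Int) + 1))) := by
      intro i hi
      have h0i : 0 ≤ i := ((PySem.List.mem_pyRange_iff_of_pos (by positivity) i).1 hi).1
      simp only [Function.comp]
      rw [PySem.List.slice_toNat _ (by omega) (by omega), PySem.List.slice_toNat _ (by omega) (by omega)]
      have hd : List.drop ((((m : Int) + 1) + i).toNat) (x :: xs) = List.drop i.toNat (xs.drop m) := by
        have e : (((m : Int) + 1) + i).toNat = (i.toNat + m) + 1 := by omega
        rw [e, List.drop_succ_cons, List.drop_drop]
        congr 1
        omega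
      rw [hd]
      congr 1
      omega
    rw [List.map_congr_left htail, hlen, ih]
    rw [pvSpec_cons, if_neg h]
    simp

theorem pvSpec_full (m : Nat) (l : List String) :
    ∀ W ∈ (pvSpec m l).1, W.length = m + 1 := by
  induction l using pvSpec.induct m with
  | case1 => simp [pvSpec_nil]
  | case2 x xs h => simp [pvSpec_cons, h]
  | case3 x xs h ih =>
    intro W hW
    rw [pvSpec_cons, if_neg h] at hW
    rcases List.mem_cons.1 hW with hW | hW
    · subst hW
      simp
      omega
    · exact ih W hW

theorem pvSpec_rem (m : Nat) (l : List String) :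
    (pvSpec m l).2.length < m + 1 := by
  induction l using pvSpec.induct m with
  | case1 => simp [pvSpec_nil]
  | case2 x xs h =>
    rw [pvSpec_cons, if_pos h]
    simp
    omega
  | case3 x xs h ih =>
    rw [pvSpec_cons, if_neg h]
    exact ih

-- A's patched chunk list equals B's finalize, given the chunk-shape invariants
theorem patch_eq_finalize (ws : Int) (m : Nat) (hm : ws = (m : Int) + 1)
    (F : List (List String)) (r : List String)
    (hF : ∀ W ∈ F, W.length = m + 1) (hr : r.length < m + 1) :
    kwPatch ws (F ++ (if r = [] then [] else [r]))
      = (if r ≠ [] then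
           if F ≠ [] then
             F ++ [r ++ PySem.List.slice (PySem.List.pyGetD F (-1) ([] : List String)) (some ((r.length : Int) - ws)) none]
           else F ++ [r]
         else F) := by
  by_cases hrn : r = []
  · subst hrn
    rw [if_pos rfl, if_neg (by simp), List.append_nil]
    unfold kwPatch
    rw [if_neg]
    rintro ⟨h1, h2⟩
    have hne : F ≠ [] := by
      intro e
      subst e
      simp at h1
    rw [PySem.List.pyGetD_neg_one F ([] : List String) hne] at h2
    rw [hF _ (List.getLast_mem hne)] at h2
    omega
  · rw [if_neg hrn, if_pos hrn]
    by_cases hFn : F = []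
    · subst hFn
      rw [if_neg (by simp)]
      simp only [List.nil_append]
      unfold kwPatch
      rw [if_neg (by simp)]
    · rw [if_pos hFn]
      have h0 : 0 < F.length := List.length_pos_of_ne_nil hFn
      have hlast : PySem.List.pyGetD (F ++ [r]) (-1) ([] : List String) = r :=
        PySem.List.pyGetD_neg_one_append_singleton F r ([] : List String)
      unfold kwPatch
      rw [hlast]
      rw [if_pos ⟨by simp; omega, by omega⟩]
      rw [pyGetD_neg_two_append F r hFn, List.dropLast_concat]
      have hneg : -(ws - (r.length : Int)) = (r.length : Int) - ws := by ring
      rw [hneg]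

-- ===== VERDICT (by name: the statement is the Claim_ definition above) =====
theorem kmer2window_spec : Claim_equal_kmer2window := by
  intro kmers ws _ hpre
  unfold Spec_kmer2window
  rcases lt_trichotomy ws 0 with h | h | h
  · unfold kmer2window kmer2window_alt
    rw [pyRange_neg_empty _ _ h (by positivity), if_pos h]
    simp
  · exact absurd h hpre
  · obtain ⟨m, hm⟩ : ∃ m : Nat, ws = (m : Int) + 1 := ⟨(ws - 1).toNat, by omega⟩
    have hB : kmer2window_alt kmers ws
        = (if (pvSpec m kmers).2 ≠ [] then
             if (pvSpec m kmers).1 ≠ [] then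
               (pvSpec m kmers).1 ++ [(pvSpec m kmers).2 ++ PySem.List.slice (PySem.List.pyGetD (pvSpec m kmers).1 (-1) ([] : List String)) (some ((((pvSpec m kmers).2.length : Int)) - ws)) none]
             else (pvSpec m kmers).1 ++ [(pvSpec m kmers).2]
           else (pvSpec m kmers).1) := by
      unfold kmer2window_alt
      rw [if_neg (by omega), foldl_altStep m ws hm kmers [] [],
          pvCF_eq_pvSpec m kmers [] (by simp)]
      simp
    have hA : kmer2window kmers ws
        = kwPatch ws ((pvSpec m kmers).1 ++ (if (pvSpec m kmers).2 = [] then [] else [(pvSpec m kmers).2])) := by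
      cases kmers with
      | nil =>
        unfold kmer2window
        rw [PySem.List.pyRange_of_pos _ _ h]
        simp [pvSpec_nil, kwPatch]
      | cons x xs =>
        unfold kmer2window
        rw [loop_eq (x :: xs) ws _ []
          (by rw [pyRange_pos_cons _ _ h (by simp)]; simp)
          (fun i hi => full_of_mem_dropLast (x :: xs) ws h i hi)]
        rw [List.nil_append]
        rw [hm, chunks_eq_pvSpec m (x :: xs)]
    rw [hA, hB, patch_eq_finalize ws m hm _ _ (pvSpec_full m kmers) (pvSpec_rem m kmers)]
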